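-- pv_equiv track=rewrite | github.com/Rav872/A2Z-DSA | Step7.1_Recursion_Get_a_strong_hold/3.py | isGoodNumber
-- ===== SOURCE A (Python) =====
-- def isGoodNumber(num):
--     lastDigit = -99999
--     totalSum = 0
--     firstDigit = True
--     while num > 0:
--         digit = num % 10
--         if not firstDigit:
--             if digit <= totalSum:
--                 return False
--         num = num // 10
--         totalSum += digit
--         firstDigit = False
--     return True
-- ===== SOURCE B (Python) =====
-- def isGoodNumber(num):
--     digits = []
--     n = num
--     while n > 0:
--         digits.append(n % 10)
--         n //= 10
--     total = sum(digits)
--     remaining = total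
--     msb_first = digits[::-1]
--     for pos, d in enumerate(msb_first):
--         remaining -= d
--         if pos != len(msb_first) - 1 and d <= remaining:
--             return False
--     return True
-- ===== Notes on version B (the rewrite author's own statement) =====
-- stated objective: alternative
-- what changed: A makes one LSB-first pass with a running sum and a first-digit flag; B materialises the digit list, computes the total once, and scans MSB-first comparing each digit against the suffix sum obtained by subtraction.
import Mathlib
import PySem

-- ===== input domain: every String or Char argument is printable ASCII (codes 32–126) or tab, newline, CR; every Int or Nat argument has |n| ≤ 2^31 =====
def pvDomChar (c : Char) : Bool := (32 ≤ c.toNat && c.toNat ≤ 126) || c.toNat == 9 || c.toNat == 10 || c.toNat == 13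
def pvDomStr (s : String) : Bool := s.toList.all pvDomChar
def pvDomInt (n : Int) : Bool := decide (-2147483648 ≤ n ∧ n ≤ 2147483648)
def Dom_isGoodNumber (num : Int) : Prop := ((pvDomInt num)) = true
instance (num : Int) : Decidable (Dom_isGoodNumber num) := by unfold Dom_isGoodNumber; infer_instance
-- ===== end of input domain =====

-- B re-implements A with a different decomposition: digit list + one total, then an MSB-first
-- scan against suffix sums by subtraction (no first-digit flag, no running accumulation order).

-- ===== PORT A =====
-- the while loop of A: state (num, totalSum, firstDigit); lastDigit is dead in A and dropped
def pvALoop (num totalSum : Int) (firstDigit : Bool) : Bool :=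
  if _h : 0 < num then
    let digit := PySem.Int.mod num 10
    if firstDigit = false ∧ digit ≤ totalSum then false
    else pvALoop (PySem.Int.floordiv num 10) (totalSum + digit) false
  else true
termination_by num.toNat
decreasing_by
  have := PySem.Int.floordiv_eq_ediv_of_pos (a := num) (b := 10) (by omega)
  omega

def isGoodNumber (num : Int) : Bool := pvALoop num 0 true

-- ===== PORT B =====
-- the while loop of Source B building `digits` (LSB first)
def pvDigits (n : Int) : List Int :=
  if _h : 0 < n then PySem.Int.mod n 10 :: pvDigits (PySem.Int.floordiv n 10) else []
termination_by n.toNat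
decreasing_by
  have := PySem.Int.floordiv_eq_ediv_of_pos (a := n) (b := 10) (by omega)
  omega

-- the for loop of Source B over msb_first; `pos != len(msb_first) - 1` is `rest ≠ []`
def pvBLoop (remaining : Int) : List Int → Bool
  | [] => true
  | d :: rest =>
      let remaining' := remaining - d
      if rest ≠ [] ∧ d ≤ remaining' then false
      else pvBLoop remaining' rest

def isGoodNumber_alt (num : Int) : Bool :=
  let digits := pvDigits num
  let total := digits.sum
  -- digits[::-1] is List.reverse (PySem.List.slice?_none_none_neg_one)
  pvBLoop total digits.reverse

-- ===== PRECONDITION & SPEC =====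
def Spec_isGoodNumber (num : Int) (out : Bool) : Prop := out = isGoodNumber_alt num
instance (num : Int) (out : Bool) : Decidable (Spec_isGoodNumber num out) := by unfold Spec_isGoodNumber; infer_instance

-- ===== CLAIM (what is proved, stated in full; the proofs are below) =====
def Claim_equal_isGoodNumber : Prop := ∀ (num : Int), Dom_isGoodNumber num → Spec_isGoodNumber num (isGoodNumber num)

-- ===== LEMMAS AND PROOFS =====

-- A's checks, as a recursion over the LSB-first digit list (after the first digit)
def pvQ (t : Int) : List Int → Bool
  | [] => true
  | d :: ds => if d ≤ t then false else pvQ (t + d) ds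

-- B's checks, as a recursion over the MSB-first digit list
def pvQB : List Int → Bool
  | [] => true
  | [_] => true
  | d :: e :: rest => if d ≤ (e :: rest).sum then false else pvQB (e :: rest)

theorem pvALoop_false_eq (n : Int) : ∀ t, pvALoop n t false = pvQ t (pvDigits n) := by
  induction n using pvDigits.induct with
  | case1 n h ih =>
      intro t
      rw [pvALoop, pvDigits, dif_pos h, dif_pos h, pvQ]
      by_cases hc : PySem.Int.mod n 10 ≤ t
      · rw [if_pos ⟨rfl, hc⟩, if_pos hc]
      · rw [if_neg (fun hcon => hc hcon.2), if_neg hc, ih]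
  | case2 n h =>
      intro t
      rw [pvALoop, pvDigits, dif_neg h, dif_neg h]
      rfl

theorem isGoodNumber_eq_pvQ (n : Int) :
    isGoodNumber n = match pvDigits n with
      | [] => true
      | d :: ds => pvQ d ds := by
  unfold isGoodNumber
  by_cases h : 0 < n
  · rw [pvALoop, dif_pos h, if_neg (by simp), pvALoop_false_eq,
      show pvDigits n = PySem.Int.mod n 10 :: pvDigits (PySem.Int.floordiv n 10) from by
        rw [pvDigits, dif_pos h]]
    rw [zero_add]
  · rw [pvALoop, dif_neg h, show pvDigits n = [] from by rw [pvDigits, dif_neg h]]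

theorem pvBLoop_sum_eq (M : List Int) : pvBLoop M.sum M = pvQB M := by
  induction M with
  | nil => rfl
  | cons d rest ih =>
      rw [pvBLoop]
      have hs : (d :: rest).sum - d = rest.sum := by simp
      rw [hs]
      cases rest with
      | nil => rw [if_neg (by simp)]; rfl
      | cons e r =>
          by_cases hc : d ≤ (e :: r).sum
          · rw [if_pos ⟨by simp, hc⟩, pvQB, if_pos hc]
          · rw [if_neg (fun hcon => hc hcon.2), pvQB, if_neg hc, ih]

theorem pvQB_two (d t : Int) : ∀ M : List Int,
    pvQB (M ++ [d, t]) = if d ≤ t then false else pvQB (M ++ [d + t]) := by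
  intro M
  induction M with
  | nil =>
      by_cases hc : d ≤ t <;> simp [pvQB, hc]
  | cons x M' ih =>
      cases M' with
      | nil =>
          by_cases h1 : x ≤ d + t
          · by_cases h2 : d ≤ t
            · simp [pvQB, h1, h2]
            · simp [pvQB, h1, h2]
          · by_cases h2 : d ≤ t
            · simp [pvQB, h1, h2]
            · simp [pvQB, h1, h2]
      | cons y M'' =>
          have hsum : (y :: (M'' ++ [d, t])).sum = (y :: (M'' ++ [d + t])).sum := by
            simp
          simp only [List.cons_append] at ih ⊢
          rw [pvQB, hsum, ih]
          conv_rhs => rw [pvQB]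
          split_ifs <;> rfl

theorem pvQB_reverse_snoc (ds : List Int) : ∀ t, pvQB (ds.reverse ++ [t]) = pvQ t ds := by
  induction ds with
  | nil => intro t; simp [pvQB, pvQ]
  | cons d ds' ih =>
      intro t
      have h2 : (d :: ds').reverse ++ [t] = ds'.reverse ++ [d, t] := by simp
      rw [h2, pvQB_two, pvQ]
      by_cases hc : d ≤ t
      · rw [if_pos hc, if_pos hc]
      · rw [if_neg hc, if_neg hc, ih (d + t), add_comm d t]

theorem isGoodNumber_alt_eq_pvQB (n : Int) :
    isGoodNumber_alt n = pvQB (pvDigits n).reverse := by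
  show pvBLoop (pvDigits n).sum (pvDigits n).reverse = pvQB (pvDigits n).reverse
  rw [← List.sum_reverse]
  exact pvBLoop_sum_eq _

-- ===== VERDICT (by name: the statement is the Claim_ definition above) =====
theorem isGoodNumber_spec : Claim_equal_isGoodNumber := by
  intro num _hdom
  unfold Spec_isGoodNumber
  rw [isGoodNumber_eq_pvQ, isGoodNumber_alt_eq_pvQB]
  cases h : pvDigits num with
  | nil => rfl
  | cons d ds => rw [List.reverse_cons, pvQB_reverse_snoc]
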